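-- pv_equiv track=rewrite | github.com/rolansy/Xtreme | Double Sequenced.py | generate_doubled_sequence
-- ===== SOURCE A (Python) =====
-- def generate_doubled_sequence(N):
--     if N % 2 != 0:
--         return -1
--     sequence = [0] * (2 * N)
--     for i in range(1, N + 1):
--         sequence[i - 1] = i
--         sequence[i - 1 + i] = i
--     return sequence
-- ===== SOURCE B (Python) =====
-- def generate_doubled_sequence(N):
--     if N % 2 != 0:
--         return -1
--     return [j + 1 if j < N else ((j + 1) // 2 if j % 2 == 1 else 0)
--             for j in range(2 * N)]
-- ===== Notes on version B (the rewrite author's own statement) =====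
-- stated objective: simpler
-- what changed: B replaces A's out-of-order scatter (two overwriting writes per loop iteration into a preallocated zero array) with a single comprehension that computes each output position j directly from a closed-form index formula.
-- outside the precondition, e.g. on generate_doubled_sequence(3): A returns -1, B returns -1; on generate_doubled_sequence(-1): A returns -1, B returns -1
import Mathlib
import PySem

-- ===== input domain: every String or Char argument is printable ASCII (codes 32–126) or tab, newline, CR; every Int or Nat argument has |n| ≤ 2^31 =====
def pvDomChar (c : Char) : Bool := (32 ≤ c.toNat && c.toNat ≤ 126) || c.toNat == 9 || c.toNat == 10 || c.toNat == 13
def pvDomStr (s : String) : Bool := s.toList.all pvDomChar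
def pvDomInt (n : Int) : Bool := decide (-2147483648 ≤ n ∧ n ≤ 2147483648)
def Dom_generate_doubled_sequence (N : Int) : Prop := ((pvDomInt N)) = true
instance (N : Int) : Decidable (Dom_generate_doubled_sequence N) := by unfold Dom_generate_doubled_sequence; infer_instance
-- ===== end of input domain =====

-- B computes each output position by a closed-form index formula in one comprehension
-- instead of A's out-of-order scatter writes (objective: simpler).

-- ===== PORT A =====
/-- A's loop body: sequence[i-1] = i; sequence[i-1+i] = i. -/
def pvStep (sequence : List Int) (i : Int) : List Int :=
  (sequence.set (i - 1).toNat i).set (i - 1 + i).toNat i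

def generate_doubled_sequence (N : Int) : List Int :=
  if PySem.Int.mod N 2 ≠ 0 then
    []  -- Python A returns the int -1 here, not a list; these inputs are excluded by Pre_
  else
    (PySem.List.pyRange 1 (N + 1)).foldl pvStep (List.replicate (2 * N).toNat 0)

-- ===== PORT B =====
def generate_doubled_sequence_alt (N : Int) : List Int :=
  if PySem.Int.mod N 2 ≠ 0 then
    []  -- Python B returns the int -1 here, not a list; these inputs are excluded by Pre_
  else
    (PySem.List.pyRange 0 (2 * N)).map
      (fun j => if j < N then j + 1
                else if PySem.Int.mod j 2 = 1 then PySem.Int.floordiv (j + 1) 2 else 0)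

-- ===== PRECONDITION & SPEC =====
-- Pre_ excludes odd N, where both Pythons return the int -1, which is not a value of the
-- declared return type (a list of ints).
def Pre_generate_doubled_sequence (N : Int) : Prop := PySem.Int.mod N 2 = 0
instance (N : Int) : Decidable (Pre_generate_doubled_sequence N) := by
  unfold Pre_generate_doubled_sequence; infer_instance
def pvWitness_generate_doubled_sequence : Int := 4

def Spec_generate_doubled_sequence (N : Int) (out : List Int) : Prop := out = generate_doubled_sequence_alt N
instance (N : Int) (out : List Int) : Decidable (Spec_generate_doubled_sequence N out) := by unfold Spec_generate_doubled_sequence; infer_instance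

-- ===== CLAIM (what is proved, stated in full; the proofs are below) =====
def Claim_equal_generate_doubled_sequence : Prop := ∀ (N : Int), Dom_generate_doubled_sequence N → Pre_generate_doubled_sequence N → Spec_generate_doubled_sequence N (generate_doubled_sequence N)

-- ===== LEMMAS AND PROOFS =====

theorem pvStep_length (s : List Int) (i : Int) : (pvStep s i).length = s.length := by
  simp [pvStep]

theorem pvFold_length (xs : List Int) (s : List Int) :
    (xs.foldl pvStep s).length = s.length := by
  induction xs generalizing s with
  | nil => rfl
  | cons x xs ih => simp [List.foldl, ih, pvStep_length]

/-- Elementwise characterisation of A's scatter loop after the first k iterations. -/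
theorem pvFold_getElem? (n : Nat) :
    ∀ k : Nat, k ≤ n → ∀ j : Nat, j < 2 * n →
      ((PySem.List.pyRange 1 ((k : Int) + 1)).foldl pvStep
          (List.replicate (2 * n) (0 : Int)))[j]? =
        some (if j < k then (j : Int) + 1
              else if j % 2 = 1 ∧ (j + 1) / 2 ≤ k then (((j + 1) / 2 : Nat) : Int)
              else 0) := by
  intro k
  induction k with
  | zero =>
    intro _ j hj
    rw [PySem.List.pyRange_one_eq_nil (by omega)]
    simp only [List.foldl_nil, List.getElem?_replicate, if_pos hj]
    congr 1
    split_ifs <;> omega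
  | succ k ih =>
    intro hk j hj
    have hcast : ((k + 1 : Nat) : Int) + 1 = ((k : Int) + 1) + 1 := by push_cast; ring
    rw [hcast, PySem.List.pyRange_one_succ_right (by omega), List.foldl_append]
    simp only [List.foldl_cons, List.foldl_nil]
    have hlen : ((PySem.List.pyRange 1 ((k : Int) + 1)).foldl pvStep
        (List.replicate (2 * n) (0 : Int))).length = 2 * n := by
      rw [pvFold_length]; simp
    have h1 : ((k : Int) + 1 - 1).toNat = k := by omega
    have h2 : ((k : Int) + 1 - 1 + ((k : Int) + 1)).toNat = 2 * k + 1 := by omega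
    rw [pvStep, h1, h2]
    rw [List.getElem?_set, List.getElem?_set]
    simp only [List.length_set, hlen]
    by_cases hj1 : j = 2 * k + 1
    · subst hj1
      rw [if_pos rfl, if_pos (by omega)]
      congr 1
      split_ifs <;> omega
    · rw [if_neg (by omega)]
      by_cases hj2 : j = k
      · subst hj2
        rw [if_pos rfl, if_pos (by omega)]
        congr 1
        rw [if_pos (by omega)]
      · rw [if_neg (by omega), ih (by omega) j hj]
        congr 1
        split_ifs <;> omega

theorem generate_doubled_sequence_eq (N : Int) (hpre : PySem.Int.mod N 2 = 0) :
    generate_doubled_sequence N = generate_doubled_sequence_alt N := by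
  unfold generate_doubled_sequence generate_doubled_sequence_alt
  rw [if_neg (not_not_intro hpre), if_neg (not_not_intro hpre)]
  by_cases hN : N ≤ 0
  · rw [PySem.List.pyRange_one_eq_nil (by omega), PySem.List.pyRange_one_eq_nil (by omega)]
    simp only [List.foldl_nil, List.map_nil]
    have : (2 * N).toNat = 0 := by omega
    rw [this]; rfl
  · -- N > 0: write N = ↑n and compare elementwise
    obtain ⟨n, rfl⟩ : ∃ n : Nat, N = (n : Int) := ⟨N.toNat, by omega⟩
    have h2n : 2 * (n : Int) = ((2 * n : Nat) : Int) := by push_cast; ring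
    have htoNat : (2 * (n : Int)).toNat = 2 * n := by omega
    rw [htoNat, h2n, PySem.List.pyRange_zero_natCast, List.map_map]
    apply List.ext_getElem?
    intro j
    by_cases hj : j < 2 * n
    · rw [pvFold_getElem? n n le_rfl j hj]
      rw [List.getElem?_map, List.getElem?_range hj]
      simp only [Option.map_some, Function.comp]
      congr 1
      have hmod : PySem.Int.mod (j : Int) 2 = ((j % 2 : Nat) : Int) := by
        exact_mod_cast PySem.Int.mod_natCast j 2
      have hfd : PySem.Int.floordiv ((j : Int) + 1) 2 = (((j + 1) / 2 : Nat) : Int) := by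
        rw [show ((j : Int) + 1) = ((j + 1 : Nat) : Int) by push_cast; ring]
        exact_mod_cast PySem.Int.floordiv_natCast (j + 1) 2
      rw [hmod, hfd]
      split_ifs <;> omega
    · rw [List.getElem?_eq_none, List.getElem?_eq_none]
      · simpa using (by omega : ¬ j < 2 * n)
      · rw [pvFold_length]; simpa using (by omega : ¬ j < 2 * n)

-- ===== VERDICT (by name: the statement is the Claim_ definition above) =====
theorem generate_doubled_sequence_spec : Claim_equal_generate_doubled_sequence := by
  intro N _ hpre
  exact generate_doubled_sequence_eq N hpre
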